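-- pv_equiv track=rewrite | github.com/hanzi-chai/chai | pychai/core/chai_classical.py | __nextRoot
-- ===== SOURCE A (Python) =====
-- from typing import List
--
-- def __nextRoot(n) -> List[int]:
--     """
--     功能：给定字未拆完的部分，求拆出下一个字根的所有可能性
--     输入：数 n
--     输出：在数的二进制表示中左边第一位取 1 ，其余所有「1」的位上取 1 或取 0
--         的所有可能的数的列表
--     备注：一个含有n笔的字可用一个十进制数2**n-1表达其笔画状态
--         例如一个3笔的字可以用7来表示，其对应二进值是111
--         对于字的任意切片，可同理表示，上字含首末笔的切片为101，对应十进值为5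
--         以下算法基于位运算
--     """
--     powerList = [0]
--     while n: # 直到当前序列所有「1」位都被置0之前，做：
--         # 找到右边第一个「1」，如1110010的右二位，将其置0，得余待检序列1110000
--         t = n & (n - 1)
--         # 当前序列扣除余待检序列，获得当前位及其右边所有位，1110010-1110000=10
--         m = n - t
--         # 将余待检序列设为当前序列，用于下一loop
--         n = t
--         # 对列表中每一个已有位扩增当前位「1」，并以此列表扩增原列表
--         powerList = powerList + [x + m for x in powerList]
--         # 当前位的「0」选项，将会在下一位「1」扩增时扩增
--     # 将所有不足笔数长度的序列剔除，表明所取切片必含输入切片的第一笔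
--     return powerList[len(powerList)//2:]
-- ===== SOURCE B (Python) =====
-- from typing import List
--
-- def __nextRoot(n) -> List[int]:
--     # Collect the values of n's set bits once (lowest-bit peeling), then
--     # enumerate all subsets that contain the highest bit with one counting loop.
--     if n == 0:
--         return [0]
--     bits = []
--     m = n
--     while m:
--         low = m & -m
--         bits.append(low)
--         m -= low
--     lower, msb = bits[:-1], bits[-1]
--     res = []
--     for mask in range(1 << len(lower)):
--         total = msb
--         for i, b in enumerate(lower):
--             if (mask >> i) & 1:
--                 total += b
--         res.append(total)
--     return res
-- ===== Notes on version B (the rewrite author's own statement) =====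
-- stated objective: alternative
-- what changed: Instead of iteratively doubling a power list with list concatenations and keeping its second half, B extracts the set-bit values once (lowest-bit peeling with m & -m), separates the highest bit, and enumerates the subsets containing it with a single counting loop over masks.
import Mathlib
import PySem

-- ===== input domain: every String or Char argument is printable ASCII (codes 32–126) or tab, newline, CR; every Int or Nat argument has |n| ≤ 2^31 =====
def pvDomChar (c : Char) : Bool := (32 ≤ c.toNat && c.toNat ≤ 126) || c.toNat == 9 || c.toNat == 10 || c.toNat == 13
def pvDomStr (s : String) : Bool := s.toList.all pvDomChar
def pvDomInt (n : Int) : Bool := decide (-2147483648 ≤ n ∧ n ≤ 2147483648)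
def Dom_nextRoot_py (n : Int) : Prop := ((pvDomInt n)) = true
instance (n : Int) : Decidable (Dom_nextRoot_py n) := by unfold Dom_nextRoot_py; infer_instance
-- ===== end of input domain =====

-- B extracts the set-bit values once and enumerates the subsets containing the highest bit
-- with a single counting loop over masks; objective: alternative algorithm (not claimed faster).

-- ===== PORT A =====

-- termination helper for both loops (cited in decreasing_by)
theorem pv_band_pred_lt (n : Int) (h : 0 < n) :
    (PySem.Int.band n (n - 1)).toNat < n.toNat := by
  have h0 : 0 ≤ n := le_of_lt h
  have h1 : 0 ≤ n - 1 := Int.sub_nonneg.mpr ((zero_add (1:Int)) ▸ Int.lt_iff_add_one_le.mp h)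
  rw [PySem.Int.band_of_nonneg h0 h1, Int.toNat_natCast]
  exact Nat.lt_of_le_of_lt Nat.and_le_right ((Int.toNat_lt_toNat h).mpr (sub_one_lt n))

-- while n: t = n & (n-1); m = n - t; n = t; powerList = powerList + [x + m for x in powerList]
-- (Python's `while n:` is `n ≠ 0`; the guard is `0 < n` for totality — for n < 0 the Python loop
--  never terminates, and those inputs are excluded by Pre_)
def loopA (n : Int) (P : List Int) : List Int :=
  if h : 0 < n then
    let t := PySem.Int.band n (n - 1)
    let m := n - t
    loopA t (P ++ P.map (fun x => x + m))
  else P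
termination_by n.toNat
decreasing_by exact pv_band_pred_lt n h

def nextRoot_py (n : Int) : List Int :=
  let P := loopA n [0]
  PySem.List.slice P (some (PySem.Int.floordiv (PySem.List.len P) 2)) none

-- ===== PORT B =====

-- m - (m & -m) = m & (m-1) for m > 0 (cited by the loop's decreasing_by)
theorem pv_sub_lowbit (m : Int) (h : 0 < m) :
    m - PySem.Int.band m (-m) = PySem.Int.band m (m - 1) := by
  have h0 : 0 ≤ m := le_of_lt h
  have h1 : 0 ≤ m - 1 := Int.sub_nonneg.mpr ((zero_add (1:Int)) ▸ Int.lt_iff_add_one_le.mp h)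
  have hneg : ¬ 0 ≤ -m := not_le.mpr (neg_neg_of_pos h)
  have e0 : (-(-m) - 1).toNat = m.toNat - 1 := by rw [neg_neg, Int.pred_toNat]
  have e1 : PySem.Int.band m (-m) = ((m.toNat - (m.toNat &&& (m.toNat - 1)) : ℕ) : Int) := by
    simp only [PySem.Int.band]
    rw [if_pos h0, if_neg hneg, e0]
  have e2 : PySem.Int.band m (m - 1) = ((m.toNat &&& (m.toNat - 1) : ℕ) : Int) := by
    rw [PySem.Int.band_of_nonneg h0 h1, Int.pred_toNat]
  rw [e1, e2, Nat.cast_sub Nat.and_le_left, Int.toNat_of_nonneg h0, sub_sub_cancel]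

-- while m: low = m & -m; bits.append(low); m -= low   (guard `0 < m` for totality, as in loopA)
def bitsB (m : Int) : List Int :=
  if h : 0 < m then
    let low := PySem.Int.band m (-m)
    low :: bitsB (m - low)
  else []
termination_by m.toNat
decreasing_by
  rw [pv_sub_lowbit m h]
  exact pv_band_pred_lt m h

def nextRoot_py_alt (n : Int) : List Int :=
  if n = 0 then [0]
  else
    let bits := bitsB n
    let lower := PySem.List.slice bits none (some (-1))   -- bits[:-1]
    let msb := PySem.List.pyGetD bits (-1) 0              -- bits[-1] (nonempty whenever reached under Pre_)
    (PySem.List.pyRange 0 ((1 : Int) <<< lower.length) 1).map (fun mask =>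
      (PySem.List.enumerate lower).foldl
        (fun total p =>
          if PySem.Int.band (mask >>> p.1) 1 ≠ 0 then total + p.2 else total)
        msb)

-- ===== PRECONDITION & SPEC =====
-- Pre_ excludes n < 0, on which A's `while n:` loop never terminates (A returns no value there).
def Pre_nextRoot_py (n : Int) : Prop := 0 ≤ n
instance (n : Int) : Decidable (Pre_nextRoot_py n) := by unfold Pre_nextRoot_py; infer_instance
def pvWitness_nextRoot_py : Int := 13

def Spec_nextRoot_py (n : Int) (out : List Int) : Prop := out = nextRoot_py_alt n
instance (n : Int) (out : List Int) : Decidable (Spec_nextRoot_py n out) := by unfold Spec_nextRoot_py; infer_instance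

-- ===== CLAIM (what is proved, stated in full; the proofs are below) =====
def Claim_equal_nextRoot_py : Prop := ∀ (n : Int), Dom_nextRoot_py n → Pre_nextRoot_py n → Spec_nextRoot_py n (nextRoot_py n)

-- ===== LEMMAS AND PROOFS =====

-- A's loop body as a function
def pvStep : List Int → Int → List Int := fun P m => P ++ P.map (fun x => x + m)

-- the value B adds for mask j over the lower bits l (indices via zipIdx)
def pvSub (j : ℕ) (l : List Int) : Int :=
  (l.zipIdx.map (fun p => if j.testBit p.2 then p.1 else 0)).sum

theorem pv_bitsB_pos (m : Int) (h : 0 < m) :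
    bitsB m = (m - PySem.Int.band m (m - 1)) :: bitsB (PySem.Int.band m (m - 1)) := by
  rw [bitsB, dif_pos h]
  show PySem.Int.band m (-m) :: bitsB (m - PySem.Int.band m (-m)) = _
  have e := pv_sub_lowbit m h
  rw [e]
  congr 1
  omega

theorem pv_loopA_eq (n : Int) (P : List Int) :
    loopA n P = List.foldl pvStep P (bitsB n) := by
  induction hn : n.toNat using Nat.strong_induction_on generalizing n P with
  | _ a ih =>
    by_cases h : 0 < n
    · rw [loopA, dif_pos h, pv_bitsB_pos n h, List.foldl_cons]
      subst hn
      exact ih _ (pv_band_pred_lt n h) _ _ rfl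
    · rw [loopA, dif_neg h, bitsB, dif_neg h, List.foldl_nil]

theorem pv_len_foldl (l : List Int) (P : List Int) :
    (List.foldl pvStep P l).length = P.length * 2 ^ l.length := by
  induction l generalizing P with
  | nil => simp
  | cons b t ih =>
    rw [List.foldl_cons, ih]
    simp [pvStep, List.length_append, List.length_map]
    ring

theorem pv_sub_append (j : ℕ) (l : List Int) (b : Int) :
    pvSub j (l ++ [b]) = pvSub j l + if j.testBit l.length then b else 0 := by
  unfold pvSub
  rw [List.zipIdx_append, List.map_append, List.sum_append]
  simp

theorem pv_sub_congr (j j' : ℕ) (l : List Int)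
    (h : ∀ i < l.length, j.testBit i = j'.testBit i) :
    pvSub j l = pvSub j' l := by
  unfold pvSub
  congr 1
  apply List.map_congr_left
  intro p hp
  obtain ⟨-, h2, -⟩ := List.mem_zipIdx hp
  rw [h p.2 (by omega)]

-- A's doubling loop lists exactly the subset sums in binary-counting order
theorem pv_main (l : List Int) :
    List.foldl pvStep [0] l = (List.range (2 ^ l.length)).map (fun j => pvSub j l) := by
  induction l using List.reverseRecOn with
  | nil => simp [pvSub]
  | append_singleton t b ih =>
    rw [List.foldl_append, List.foldl_cons, List.foldl_nil, ih]
    have hlen : (t ++ [b]).length = t.length + 1 := by simp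
    rw [hlen, pow_succ, Nat.mul_two, List.range_add, List.map_append, List.map_map]
    show pvStep _ _ = _
    unfold pvStep
    congr 1
    · apply List.map_congr_left
      intro j hj
      rw [List.mem_range] at hj
      rw [pv_sub_append, Nat.testBit_lt_two_pow hj, if_neg (by simp), add_zero]
    · rw [List.map_map]
      apply List.map_congr_left
      intro j hj
      rw [List.mem_range] at hj
      show pvSub j t + b = pvSub (2 ^ t.length + j) (t ++ [b])
      rw [pv_sub_append, Nat.testBit_two_pow_add_eq, Nat.testBit_lt_two_pow hj]
      rw [pv_sub_congr j (2 ^ t.length + j) t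
        (fun i hi => (Nat.testBit_two_pow_add_gt hi j).symm)]
      simp

theorem pv_test (j i : ℕ) :
    (PySem.Int.band ((j : Int) >>> ((i : ℕ) : Int)) 1 ≠ 0) ↔ j.testBit i = true := by
  have e2 : (1 : Int) = ((1 : ℕ) : Int) := rfl
  rw [Int.shiftRight_natCast j i, e2, PySem.Int.band_natCast, Nat.and_one_is_mod, Nat.shiftRight_eq_div_pow,
    Nat.testBit_eq_decide_div_mod_eq]
  simp only [ne_eq, Int.natCast_eq_zero, decide_eq_true_eq]
  omega

-- B's inner loop over enumerate(lower) computes msb + pvSub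
theorem pv_inner (l : List Int) (mask : Int) (j : ℕ) (hmask : mask = (j : Int)) (c : Int) :
    (PySem.List.enumerate l).foldl
      (fun total p =>
        if PySem.Int.band (mask >>> p.1) 1 ≠ 0 then total + p.2 else total)
      c = c + pvSub j l := by
  subst hmask
  induction l using List.reverseRecOn generalizing c with
  | nil => simp [PySem.List.enumerate, pvSub]
  | append_singleton t b ih =>
    rw [PySem.List.enumerate_append, List.foldl_append, ih,
      PySem.List.enumerate_cons, PySem.List.enumerate_nil, List.foldl_cons, List.foldl_nil,
      pv_sub_append]
    have ht : (0 + (t.length : Int)) = ((t.length : ℕ) : Int) := by omega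
    rw [ht]
    by_cases hb : j.testBit t.length = true
    · rw [if_pos ((pv_test j t.length).mpr hb), if_pos hb]
      ring
    · rw [if_neg (fun hc => hb ((pv_test j t.length).mp hc)), if_neg hb]
      ring

-- ===== VERDICT (by name: the statement is the Claim_ definition above) =====
theorem pv_shl (k : ℕ) : ((1 : Int) <<< k) = ((2 ^ k : ℕ) : Int) := by
  simp [Int.shiftLeft_eq]

theorem nextRoot_py_spec : Claim_equal_nextRoot_py := by
  unfold Claim_equal_nextRoot_py
  intro n _ hpre
  unfold Spec_nextRoot_py
  unfold Pre_nextRoot_py at hpre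
  by_cases h0 : n = 0
  · subst h0
    unfold nextRoot_py
    rw [pv_loopA_eq, bitsB, dif_neg (by omega), List.foldl_nil]
    decide
  · have hpos : 0 < n := by omega
    have hbits := pv_bitsB_pos n hpos
    have hne : bitsB n ≠ [] := by rw [hbits]; simp
    set a := bitsB n with ha
    set lo := a.dropLast with hlo
    set mb := a.getLast hne with hmb
    have hsplit : lo ++ [mb] = a := List.dropLast_append_getLast hne
    set L := List.foldl pvStep [0] lo with hLdef
    have hL : L.length = 2 ^ lo.length := by
      rw [hLdef, pv_len_foldl]; simp
    -- A's value
    have hA : nextRoot_py n = L.map (fun x => x + mb) := by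
      unfold nextRoot_py
      rw [pv_loopA_eq, ← ha, ← hsplit, List.foldl_append, List.foldl_cons, List.foldl_nil, ← hLdef]
      show PySem.List.slice (pvStep L mb) (some (PySem.Int.floordiv (PySem.List.len (pvStep L mb)) 2)) none = _
      have hlen : (pvStep L mb).length = L.length + L.length := by
        simp [pvStep]
      have hfd : PySem.Int.floordiv (PySem.List.len (pvStep L mb)) 2 = ((L.length : ℕ) : Int) := by
        rw [PySem.List.len_eq, hlen, PySem.Int.floordiv_eq_ediv_of_pos (by norm_num)]
        omega
      rw [hfd, PySem.List.slice_from_natCast]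
      show (L ++ L.map (fun x => x + mb)).drop L.length = _
      rw [List.drop_left]
    -- B's value
    have hB : nextRoot_py_alt n =
        (List.range (2 ^ lo.length)).map (fun j => mb + pvSub j lo) := by
      unfold nextRoot_py_alt
      rw [if_neg h0]
      show (PySem.List.pyRange 0 ((1 : Int) <<< (PySem.List.slice (bitsB n) none (some (-1))).length) 1).map _ = _
      rw [PySem.List.slice_to_neg_one, ← ha, ← hlo, pv_shl, PySem.List.pyRange_zero_nat,
        List.map_map]
      apply List.map_congr_left
      intro j _
      simp only [Function.comp_apply]
      rw [PySem.List.pyGetD_neg_one a 0 hne, ← hmb, pv_inner lo ((j : ℕ) : Int) j rfl]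
    rw [hA, hB, hLdef, pv_main, List.map_map]
    apply List.map_congr_left
    intro j _
    show pvSub j lo + mb = mb + pvSub j lo
    ring
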